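-- pv_equiv track=rewrite | github.com/lc-sanchez/Mago-Goma | funcionesVACIAS.py | dameUltimaSilaba
-- ===== SOURCE A (Python) =====
-- def dameUltimaSilaba(enSilabas):
--     """
--         Recibe palabra separada en silabas y devuelve la ultima
--     """
--     ultima=""
--     for i in range (len(enSilabas)-1,-1,-1):
--         if enSilabas[i] !="-":
--             ultima=enSilabas[i] + ultima
--         else:
--             return ultima
--     return ultima
-- ===== SOURCE B (Python) =====
-- def dameUltimaSilaba(enSilabas):
--     """
--         Recibe palabra separada en silabas y devuelve la ultima
--     """
--     return enSilabas[enSilabas.rfind("-") + 1:]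
-- ===== Notes on version B (the rewrite author's own statement) =====
-- stated objective: simpler
-- what changed: Computes the index of the last dash with rfind and returns the single slice after it, instead of A's backward index loop that builds the result by prepending one character at a time.
import Mathlib
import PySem

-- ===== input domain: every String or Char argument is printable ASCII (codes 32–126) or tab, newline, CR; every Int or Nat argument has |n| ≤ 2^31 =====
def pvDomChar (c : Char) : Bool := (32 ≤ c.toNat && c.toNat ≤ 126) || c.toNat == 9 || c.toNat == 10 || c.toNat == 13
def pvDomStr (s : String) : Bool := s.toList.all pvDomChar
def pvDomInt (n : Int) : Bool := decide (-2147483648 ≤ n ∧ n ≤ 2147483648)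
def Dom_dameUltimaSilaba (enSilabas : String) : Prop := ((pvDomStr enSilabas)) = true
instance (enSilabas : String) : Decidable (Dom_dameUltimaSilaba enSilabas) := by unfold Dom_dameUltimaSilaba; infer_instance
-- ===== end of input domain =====

-- B replaces A's backward character-by-character accumulation loop with one rfind plus one slice (simpler/idiomatic).

-- ===== PORT A =====
-- A walks i = len-1 … 0, prepending enSilabas[i] to `ultima` until it meets '-' (early return).
-- The loop visits the characters in reverse order, so it is the obvious structural recursion on
-- enSilabas.toList.reverse with the accumulator `ultima` (kept as List Char, String-ified at the end).
def dameUltimaSilabaGo : List Char → List Char → List Char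
  | [], ultima => ultima
  | c :: rest, ultima => if c ≠ '-' then dameUltimaSilabaGo rest (c :: ultima) else ultima

def dameUltimaSilaba (enSilabas : String) : String :=
  String.ofList (dameUltimaSilabaGo enSilabas.toList.reverse [])

-- ===== PORT B =====
def dameUltimaSilaba_alt (enSilabas : String) : String :=
  PySem.Str.slice enSilabas (some (PySem.Str.rfind enSilabas "-" + 1)) none

-- ===== PRECONDITION & SPEC =====
def Spec_dameUltimaSilaba (enSilabas : String) (out : String) : Prop := out = dameUltimaSilaba_alt enSilabas
instance (enSilabas : String) (out : String) : Decidable (Spec_dameUltimaSilaba enSilabas out) := by unfold Spec_dameUltimaSilaba; infer_instance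

-- ===== CLAIM (what is proved, stated in full; the proofs are below) =====
def Claim_equal_dameUltimaSilaba : Prop := ∀ (enSilabas : String), Dom_dameUltimaSilaba enSilabas → Spec_dameUltimaSilaba enSilabas (dameUltimaSilaba enSilabas)

-- ===== LEMMAS AND PROOFS =====

-- A's loop returns the (reversed) maximal '-'-free prefix of the reversed string, on top of the accumulator.
lemma dameUltimaSilabaGo_eq (cs u : List Char) :
    dameUltimaSilabaGo cs u = (cs.takeWhile (· ≠ '-')).reverse ++ u := by
  induction cs generalizing u with
  | nil => simp [dameUltimaSilabaGo]
  | cons c rest ih =>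
    by_cases h : c = '-'
    · simp [dameUltimaSilabaGo, h, List.takeWhile]
    · simp [dameUltimaSilabaGo, h, List.takeWhile, ih]

-- ['-'] is a prefix of l iff l starts with '-'.
lemma isPrefixOf_dash (l : List Char) :
    (['-'].isPrefixOf l = true) ↔ l.head? = some '-' := by
  cases l with
  | nil => simp [List.isPrefixOf]
  | cons c rest =>
    simp only [List.isPrefixOf_iff_prefix, List.head?_cons, Option.some.injEq]
    constructor
    · rintro ⟨l', hl⟩
      exact ((List.cons_eq_cons.mp hl).1).symm
    · intro h
      exact ⟨rest, by simp [h]⟩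

-- the head of what dropWhile returns fails the predicate
lemma dropWhile_cons_head {α : Type} (p : α → Bool) (l u : List α) (a : α)
    (h : l.dropWhile p = a :: u) : p a = false := by
  induction l with
  | nil => simp at h
  | cons c rest ih =>
    rw [List.dropWhile_cons] at h
    by_cases hc : p c = true
    · exact ih (by simpa [hc] using h)
    · simp only [hc] at h
      cases h
      simpa using hc

-- rfind.go returns -1 when '-' does not occur in cs.
lemma rfind_go_of_not_mem (cs : List Char) (h : '-' ∉ cs) (k : Nat) :
    PySem.Chars.rfind.go cs ['-'] k = -1 := by
  induction k with
  | zero =>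
    rw [PySem.Chars.rfind.go]
    have hnp : ¬ (['-'].isPrefixOf cs = true) := by
      rw [isPrefixOf_dash]
      intro hh
      exact h (List.mem_of_mem_head? hh)
    simp [hnp]
  | succ j ih =>
    rw [PySem.Chars.rfind.go]
    have hnp : ¬ (['-'].isPrefixOf (cs.drop (j + 1)) = true) := by
      rw [isPrefixOf_dash]
      intro hh
      exact h (List.mem_of_mem_drop (List.mem_of_mem_head? hh))
    simp [hnp, ih]

-- rfind.go on pre ++ '-' :: rest with '-' ∉ rest returns pre.length, for any start k ≥ pre.length.
lemma rfind_go_last (pre rest : List Char) (h : '-' ∉ rest) (k : Nat)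
    (hk : pre.length ≤ k) :
    PySem.Chars.rfind.go (pre ++ '-' :: rest) ['-'] k = (pre.length : Int) := by
  induction k with
  | zero =>
    have hpre : pre = [] := List.length_eq_zero_iff.mp (Nat.le_zero.mp hk)
    subst hpre
    rw [PySem.Chars.rfind.go]
    simp
  | succ j ih =>
    rw [PySem.Chars.rfind.go]
    rcases Nat.lt_or_ge pre.length (j + 1) with hlt | hge
    · -- j+1 > pre.length: position j+1 lies inside rest (or past the end), which has no '-'
      have hnp : ¬ (['-'].isPrefixOf ((pre ++ '-' :: rest).drop (j + 1)) = true) := by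
        rw [isPrefixOf_dash, List.head?_drop]
        intro hh
        rw [show pre ++ '-' :: rest = (pre ++ ['-']) ++ rest by simp,
          List.getElem?_append_right (by simp; omega)] at hh
        exact h (List.mem_of_getElem? hh)
      simp only [hnp]
      exact ih (by omega)
    · -- j+1 = pre.length: found the last '-'
      have hj : j + 1 = pre.length := by omega
      have hdrop : (pre ++ '-' :: rest).drop (j + 1) = '-' :: rest := by
        rw [hj, List.drop_left]
      rw [hdrop]
      simp [hj]

-- the core list-level equivalence: A's reversed takeWhile = B's drop after the last '-'
lemma core (cs : List Char) :
    (cs.reverse.takeWhile (· ≠ '-')).reverse =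
      PySem.List.slice cs (some (PySem.Chars.rfind cs ['-'] + 1)) none := by
  by_cases hm : '-' ∈ cs
  · have hm' : '-' ∈ cs.reverse := by simpa using hm
    set t := cs.reverse.takeWhile (· ≠ '-') with ht
    have hsplit : cs.reverse = t ++ cs.reverse.dropWhile (· ≠ '-') :=
      (List.takeWhile_append_dropWhile).symm
    have hdw : cs.reverse.dropWhile (· ≠ '-') ≠ [] := by
      intro hnil
      have := List.mem_append.mp (hsplit ▸ hm')
      rcases this with h1 | h1
      · have := List.mem_takeWhile_imp h1
        simp at this
      · rw [hnil] at h1; simp at h1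
    obtain ⟨u, hu⟩ : ∃ u, cs.reverse.dropWhile (· ≠ '-') = '-' :: u := by
      cases hdd : cs.reverse.dropWhile (· ≠ '-') with
      | nil => exact absurd hdd hdw
      | cons a u =>
        have ha := dropWhile_cons_head (· ≠ '-') cs.reverse u a hdd
        simp only [decide_eq_false_iff_not, not_not] at ha
        exact ⟨u, by rw [ha]⟩
    have hcs : cs = u.reverse ++ '-' :: t.reverse := by
      have hrev : cs.reverse = t ++ '-' :: u := by rw [hsplit, hu]
      calc cs = cs.reverse.reverse := by simp
        _ = (t ++ '-' :: u).reverse := by rw [hrev]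
        _ = u.reverse ++ '-' :: t.reverse := by simp
    have hnr : '-' ∉ t.reverse := by
      simp only [List.mem_reverse]
      intro hh
      have := List.mem_takeWhile_imp hh
      simp at this
    have hr : PySem.Chars.rfind cs ['-'] = (u.reverse.length : Int) := by
      rw [PySem.Chars.rfind]
      conv_lhs => rw [hcs]
      exact rfind_go_last u.reverse t.reverse hnr _ (by simp)
    have htn : ((u.reverse.length : Int) + 1).toNat = (u.reverse ++ ['-']).length := by
      simp
    rw [hr, PySem.List.slice_from]
    · rw [htn, hcs, show u.reverse ++ '-' :: t.reverse = (u.reverse ++ ['-']) ++ t.reverse by simp,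
        List.drop_left]
    · positivity
  · have hr : PySem.Chars.rfind cs ['-'] = -1 := by
      rw [PySem.Chars.rfind]
      exact rfind_go_of_not_mem cs hm _
    rw [hr]
    have htw : cs.reverse.takeWhile (· ≠ '-') = cs.reverse := by
      apply List.takeWhile_eq_self_iff.mpr
      intro c hc
      simp only [decide_eq_true_eq, ne_eq]
      intro hcd
      rw [hcd] at hc
      exact hm (by simpa using hc)
    rw [htw, show (-1 : Int) + 1 = 0 by ring, PySem.List.slice_from]
    · simp
    · exact le_rfl

-- ===== VERDICT (by name: the statement is the Claim_ definition above) =====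
theorem dameUltimaSilaba_spec : Claim_equal_dameUltimaSilaba := by
  intro s _
  unfold Spec_dameUltimaSilaba dameUltimaSilaba dameUltimaSilaba_alt
  apply String.toList_inj.mp
  rw [PySem.Str.toList_slice]
  simp only [PySem.Str.rfind_eq]
  rw [dameUltimaSilabaGo_eq, List.append_nil]
  simpa using core s.toList
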